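-- pv_equiv track=rewrite | github.com/Eason51/chemical-metrics | try.py | compoundName
-- ===== SOURCE A (Python) =====
-- def compoundName(string):
--     if(string == ""):
--         return False
--     string = string.lower().strip()
--     for c in string:
--         if(c.isspace()):
--             return False
--     if(string.isdigit()):
--         return True
--     if(len(string) >= 2 and string[0].isdigit()):
--         onlyDigit = True
--         for c in string:
--             if(c == "-"):
--                 continue
--             if(not onlyDigit and not c.isalpha()):
--                 return False
--             if(onlyDigit and c.isalpha()):
--                 onlyDigit = False
--             if(not c.isdigit() and not c.isalpha()):
--                 return False
--         return True
--     if(len(string) >= 2 and string[0].isalpha()):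
--         onlyLetter = True
--         for c in string:
--             if(c == "-"):
--                 continue
--             if(not onlyLetter and not c.isdigit()):
--                 return False
--             if(onlyLetter and c.isdigit()):
--                 onlyLetter = False
--             if(not c.isalpha() and not c.isdigit()):
--                 return False
--         return True
--     return False
-- ===== SOURCE B (Python) =====
-- def compoundName(string):
--     if string == "":
--         return False
--     s = string.lower().strip()
--     if any(c.isspace() for c in s):
--         return False
--     if s.isdigit():
--         return True
--     if len(s) < 2:
--         return False
--     core = [c for c in s if c != "-"]
--     if not all(c.isdigit() or c.isalpha() for c in core):
--         return False
--     if s[0].isdigit():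
--         i = 0
--         while i < len(core) and core[i].isdigit():
--             i += 1
--         return all(c.isalpha() for c in core[i:])
--     if s[0].isalpha():
--         i = 0
--         while i < len(core) and core[i].isalpha():
--             i += 1
--         return all(c.isdigit() for c in core[i:])
--     return False
-- ===== Notes on version B (the rewrite author's own statement) =====
-- stated objective: alternative
-- what changed: A's two fused single-pass state machines (onlyDigit/onlyLetter flags with dash-skipping inside the loop) are replaced by separate passes: filter out the dashes once, check the remaining chars are all digit-or-letter, then verify the single allowed transition with a dropWhile over the filtered list.
import Mathlib
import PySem

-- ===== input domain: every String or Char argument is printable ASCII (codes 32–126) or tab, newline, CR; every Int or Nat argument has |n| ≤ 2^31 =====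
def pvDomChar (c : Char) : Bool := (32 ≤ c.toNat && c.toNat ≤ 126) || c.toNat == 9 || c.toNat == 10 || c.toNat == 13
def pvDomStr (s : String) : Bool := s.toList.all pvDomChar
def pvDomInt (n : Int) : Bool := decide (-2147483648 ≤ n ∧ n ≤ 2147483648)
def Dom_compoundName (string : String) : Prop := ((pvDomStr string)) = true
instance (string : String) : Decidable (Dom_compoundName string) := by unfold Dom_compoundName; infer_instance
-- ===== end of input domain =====

-- B replaces A's fused single-pass state machines by separate passes (filter dashes,
-- charset check, dropWhile for the one allowed digit/letter transition): objective 'alternative'.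


-- ===== PORT A =====
-- A's first state-machine loop (first char a digit): flag onlyDigit, dashes skipped
def pvLoopD : List Char → Bool → Bool
  | [], _ => true
  | c :: rest, onlyDigit =>
    if c == '-' then pvLoopD rest onlyDigit
    else if !onlyDigit && !(PySem.Chars.isalpha c) then false
    else
      let onlyDigit' := if onlyDigit && PySem.Chars.isalpha c then false else onlyDigit
      if !(PySem.Chars.isdigit c) && !(PySem.Chars.isalpha c) then false
      else pvLoopD rest onlyDigit'

-- A's second state-machine loop (first char a letter): flag onlyLetter, dashes skipped
def pvLoopA : List Char → Bool → Bool
  | [], _ => true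
  | c :: rest, onlyLetter =>
    if c == '-' then pvLoopA rest onlyLetter
    else if !onlyLetter && !(PySem.Chars.isdigit c) then false
    else
      let onlyLetter' := if onlyLetter && PySem.Chars.isdigit c then false else onlyLetter
      if !(PySem.Chars.isalpha c) && !(PySem.Chars.isdigit c) then false
      else pvLoopA rest onlyLetter'

def compoundName (string : String) : Bool :=
  if string == "" then false
  else
    let s := (PySem.Str.strip (PySem.Str.lower string)).toList
    if s.any PySem.Chars.isspace then false
    else if PySem.Chars.strIsdigit s then true
    else
      match s with
      | [] => false
      | c0 :: _ =>
        if decide (2 ≤ s.length) && PySem.Chars.isdigit c0 then pvLoopD s true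
        else if decide (2 ≤ s.length) && PySem.Chars.isalpha c0 then pvLoopA s true
        else false

-- ===== PORT B =====
def compoundName_alt (string : String) : Bool :=
  if string == "" then false
  else
    let s := (PySem.Str.strip (PySem.Str.lower string)).toList
    if s.any PySem.Chars.isspace then false
    else if PySem.Chars.strIsdigit s then true
    else if s.length < 2 then false
    else
      let core := s.filter (fun c => !(c == '-'))
      if !(core.all (fun c => PySem.Chars.isdigit c || PySem.Chars.isalpha c)) then false
      else
        match s with
        | [] => false
        | c0 :: _ =>
          if PySem.Chars.isdigit c0 then (core.dropWhile PySem.Chars.isdigit).all PySem.Chars.isalpha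
          else if PySem.Chars.isalpha c0 then (core.dropWhile PySem.Chars.isalpha).all PySem.Chars.isdigit
          else false

-- ===== PRECONDITION & SPEC =====
def Spec_compoundName (string : String) (out : Bool) : Prop := out = compoundName_alt string
instance (string : String) (out : Bool) : Decidable (Spec_compoundName string out) := by unfold Spec_compoundName; infer_instance

-- ===== CLAIM (what is proved, stated in full; the proofs are below) =====
def Claim_equal_compoundName : Prop := ∀ (string : String), Dom_compoundName string → Spec_compoundName string (compoundName string)

-- ===== LEMMAS AND PROOFS =====

theorem digit_not_alpha (c : Char) (h : PySem.Chars.isdigit c = true) :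
    PySem.Chars.isalpha c = false := by
  simp [PySem.Chars.isdigit, PySem.Chars.isalpha, PySem.Chars.isupper, PySem.Chars.islower,
        Char.le_def] at *
  simp [UInt32.le_iff_toNat_le, UInt32.lt_iff_toNat_lt] at *
  omega

theorem alpha_not_digit (c : Char) (h : PySem.Chars.isalpha c = true) :
    PySem.Chars.isdigit c = false := by
  simp [PySem.Chars.isdigit, PySem.Chars.isalpha, PySem.Chars.isupper, PySem.Chars.islower,
        Char.le_def] at *
  simp [UInt32.le_iff_toNat_le, UInt32.lt_iff_toNat_lt] at *
  omega

theorem pvLoopD_false (l : List Char) :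
    pvLoopD l false = (l.filter (fun c => !(c == '-'))).all PySem.Chars.isalpha := by
  induction l with
  | nil => rfl
  | cons c rest ih =>
    by_cases hc : c = '-'
    · simp [pvLoopD, hc, ih]
    · cases ha : PySem.Chars.isalpha c
      · simp [pvLoopD, hc, ha]
      · simp [pvLoopD, hc, ha, ih]

theorem pvLoopA_false (l : List Char) :
    pvLoopA l false = (l.filter (fun c => !(c == '-'))).all PySem.Chars.isdigit := by
  induction l with
  | nil => rfl
  | cons c rest ih =>
    by_cases hc : c = '-'
    · simp [pvLoopA, hc, ih]
    · cases hd : PySem.Chars.isdigit c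
      · simp [pvLoopA, hc, hd]
      · simp [pvLoopA, hc, hd, ih]

theorem pvLoopD_true (l : List Char) :
    pvLoopD l true =
      ((l.filter (fun c => !(c == '-'))).all
          (fun c => PySem.Chars.isdigit c || PySem.Chars.isalpha c) &&
        ((l.filter (fun c => !(c == '-'))).dropWhile PySem.Chars.isdigit).all
          PySem.Chars.isalpha) := by
  induction l with
  | nil => rfl
  | cons c rest ih =>
    by_cases hc : c = '-'
    · simp [pvLoopD, hc, ih]
    · cases ha : PySem.Chars.isalpha c
      · cases hd : PySem.Chars.isdigit c
        · simp [pvLoopD, hc, ha, hd]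
        · simp [pvLoopD, hc, ha, hd, ih]
      · have hd : PySem.Chars.isdigit c = false := alpha_not_digit c ha
        simp only [pvLoopD, ha, hd]
        simp [hd, ha, pvLoopD_false, hc]
        intro h x hx
        rcases h x hx with h1 | h1
        · exact Or.inl h1
        · exact Or.inr (Or.inr h1)

theorem pvLoopA_true (l : List Char) :
    pvLoopA l true =
      ((l.filter (fun c => !(c == '-'))).all
          (fun c => PySem.Chars.isdigit c || PySem.Chars.isalpha c) &&
        ((l.filter (fun c => !(c == '-'))).dropWhile PySem.Chars.isalpha).all
          PySem.Chars.isdigit) := by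
  induction l with
  | nil => rfl
  | cons c rest ih =>
    by_cases hc : c = '-'
    · simp [pvLoopA, hc, ih]
    · cases hd : PySem.Chars.isdigit c
      · cases ha : PySem.Chars.isalpha c
        · simp [pvLoopA, hc, ha, hd]
        · simp [pvLoopA, hc, ha, hd, ih]
      · have ha : PySem.Chars.isalpha c = false := digit_not_alpha c hd
        simp only [pvLoopA, ha, hd]
        simp [hd, ha, pvLoopA_false, hc]
        intro h x hx
        rcases h x hx with h1 | h1
        · exact Or.inl h1
        · exact Or.inr (Or.inl h1)

-- ===== VERDICT (by name: the statement is the Claim_ definition above) =====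
theorem compoundName_spec : Claim_equal_compoundName := by
  intro string _
  unfold Spec_compoundName compoundName compoundName_alt
  by_cases h0 : string == ""
  · simp [h0]
  · simp only [h0, Bool.false_eq_true, if_false]
    set s := (PySem.Str.strip (PySem.Str.lower string)).toList with hs
    by_cases hsp : s.any PySem.Chars.isspace
    · simp [hsp]
    · simp only [hsp, Bool.false_eq_true, if_false]
      by_cases hdg : PySem.Chars.strIsdigit s
      · simp [hdg]
      · simp only [hdg, Bool.false_eq_true, if_false]
        match s with
        | [] => simp
        | [c0] => simp
        | c0 :: c1 :: t =>
          have hlen : 2 ≤ (c0 :: c1 :: t).length := by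
            simp only [List.length_cons]; omega
          have hnl : ¬ ((c0 :: c1 :: t).length < 2) := by omega
          simp only [hlen, decide_true, Bool.true_and, hnl, if_false]
          cases hd : PySem.Chars.isdigit c0
          · cases ha : PySem.Chars.isalpha c0
            · simp
            · simp only [if_true, Bool.false_eq_true, if_false]
              rw [pvLoopA_true]
              cases hall : ((c0 :: c1 :: t).filter (fun c => !(c == '-'))).all
                  (fun c => PySem.Chars.isdigit c || PySem.Chars.isalpha c)
              · simp
              · simp
          · simp only [if_true]
            rw [pvLoopD_true]
            cases hall : ((c0 :: c1 :: t).filter (fun c => !(c == '-'))).all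
                (fun c => PySem.Chars.isdigit c || PySem.Chars.isalpha c)
            · simp
            · simp
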